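-- pv_equiv track=rewrite | github.com/ousseynou-faye/pqc-mobile-rng | analysis/run_metrics.py | extract_runs
-- ===== SOURCE A (Python) =====
-- from collections.abc import Sequence
--
-- def extract_runs(bits: Sequence[int]) -> list[dict[str, int]]:
--     """J'extrais la liste ordonnee des runs dans l'echantillon binaire."""
--
--     sample = [int(bit) for bit in bits]
--     if any(bit not in (0, 1) for bit in sample):
--         raise ValueError("Je demande une sequence binaire composee uniquement de 0 et de 1.")
--
--     if not sample:
--         return []
--
--     runs: list[dict[str, int]] = []
--     current_bit = sample[0]
--     current_length = 1
--
--     for bit in sample[1:]: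
--         if bit == current_bit:
--             current_length += 1
--             continue
--
--         runs.append({"bit": current_bit, "length": current_length})
--         current_bit = bit
--         current_length = 1
--
--     runs.append({"bit": current_bit, "length": current_length})
--     return runs
-- ===== SOURCE B (Python) =====
-- from collections.abc import Sequence
--
-- def extract_runs(bits: Sequence[int]) -> list[dict[str, int]]:
--     """J'extrais la liste ordonnee des runs dans l'echantillon binaire."""
--     sample = [int(bit) for bit in bits]
--     if any(bit not in (0, 1) for bit in sample):
--         raise ValueError("Je demande une sequence binaire composee uniquement de 0 et de 1.")
--     if not sample:
--         return []
--     n = len(sample)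
--     # Pass 1: table of run boundaries (indices where the value changes), bracketed by 0 and n.
--     bounds = [0] + [i for i in range(1, n) if sample[i] != sample[i - 1]] + [n]
--     # Pass 2: each consecutive boundary pair (s, e) is one run.
--     return [{"bit": sample[s], "length": e - s} for s, e in zip(bounds, bounds[1:])]
-- ===== Notes on version B (the rewrite author's own statement) =====
-- stated objective: alternative
-- what changed: Replaced A's single-pass state machine carrying current_bit/current_length by two staged passes: first build the table of change boundaries (indices where sample[i] != sample[i-1], bracketed by 0 and n), then emit each run from consecutive boundary pairs as {'bit': sample[s], 'length': e - s}.
import Mathlib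
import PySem

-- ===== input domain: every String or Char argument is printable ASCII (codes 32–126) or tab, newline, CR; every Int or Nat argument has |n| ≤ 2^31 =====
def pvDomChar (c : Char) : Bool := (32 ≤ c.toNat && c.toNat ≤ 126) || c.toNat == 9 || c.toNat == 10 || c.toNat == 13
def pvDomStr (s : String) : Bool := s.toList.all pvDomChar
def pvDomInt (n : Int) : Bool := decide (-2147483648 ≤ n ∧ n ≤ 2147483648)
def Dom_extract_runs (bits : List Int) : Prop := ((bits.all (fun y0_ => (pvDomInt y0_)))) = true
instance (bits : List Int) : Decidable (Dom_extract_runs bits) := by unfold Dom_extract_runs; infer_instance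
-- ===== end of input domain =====

-- B replaces A's state-machine loop (current_bit/current_length) by two staged passes:
-- first a table of change boundaries, then one run per consecutive boundary pair;
-- equivalence of return values is proved on binary inputs (Pre_ excludes inputs with a
-- value other than 0/1, where Python A raises ValueError).


-- ===== PORT A =====
-- A: validate, then fold over the tail carrying (runs, current_bit, current_length),
-- flushing the final run after the loop. On non-binary input Python raises ValueError
-- (excluded by Pre_); the port returns [] there.
def extract_runs (bits : List Int) : List (List (String × Int)) :=
  let sample := bits
  if sample.any (fun b => !(b == 0 || b == 1)) then []
  else
    match sample with
    | [] => []
    | b0 :: rest =>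
      let st := rest.foldl
        (fun (s : List (List (String × Int)) × Int × Int) bit =>
          if bit == s.2.1 then (s.1, s.2.1, s.2.2 + 1)
          else (s.1 ++ [[("bit", s.2.1), ("length", s.2.2)]], bit, 1))
        ([], b0, 1)
      st.1 ++ [[("bit", st.2.1), ("length", st.2.2)]]

-- ===== PORT B =====
-- B: same validation and empty case; then pass 1 builds the boundary table
-- [0] + [i for i in range(1, n) if sample[i] != sample[i-1]] + [n], and pass 2 emits one
-- run per consecutive boundary pair (zip(bounds, bounds[1:])). Every index used is
-- provably in range, so pyGetD (total form of sample[i]) is exact here.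
def extract_runs_alt (bits : List Int) : List (List (String × Int)) :=
  let sample := bits
  if sample.any (fun b => !(b == 0 || b == 1)) then []
  else
    match sample with
    | [] => []
    | _ :: _ =>
      let n : Int := PySem.List.len sample
      let bounds : List Int :=
        0 :: ((PySem.List.pyRange 1 n 1).filter
          (fun i => !(PySem.List.pyGetD sample i 0 == PySem.List.pyGetD sample (i - 1) 0))
          ++ [n])
      (bounds.zip bounds.tail).map
        (fun se => [("bit", PySem.List.pyGetD sample se.1 0), ("length", se.2 - se.1)])

-- ===== PRECONDITION & SPEC =====
-- Pre_ excludes inputs containing a value other than 0 or 1: there Python A raises ValueError.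
def Pre_extract_runs (bits : List Int) : Prop := ∀ b ∈ bits, b = 0 ∨ b = 1
instance (bits : List Int) : Decidable (Pre_extract_runs bits) := by unfold Pre_extract_runs; infer_instance
def pvWitness_extract_runs : List Int := [0, 1, 1, 0]
def Spec_extract_runs (bits : List Int) (out : List (List (String × Int))) : Prop := out = extract_runs_alt bits
instance (bits : List Int) (out : List (List (String × Int))) : Decidable (Spec_extract_runs bits out) := by unfold Spec_extract_runs; infer_instance

-- ===== CLAIM (what is proved, stated in full; the proofs are below) =====
def Claim_equal_extract_runs : Prop := ∀ (bits : List Int), Dom_extract_runs bits → Pre_extract_runs bits → Spec_extract_runs bits (extract_runs bits)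

-- ===== LEMMAS AND PROOFS =====

-- Proof-side common form: recursive run grouping (maximal run of the head, then recurse).
def pvGroupRuns (xs : List Int) : List (List (String × Int)) :=
  match xs with
  | [] => []
  | b :: rest =>
    [("bit", b), ("length", ((rest.takeWhile (fun x => x == b)).length : Int) + 1)]
      :: pvGroupRuns (rest.dropWhile (fun x => x == b))
termination_by xs.length
decreasing_by
  simp only [List.length_cons]
  exact Nat.lt_succ_of_le (List.length_dropWhile_le _ rest)

-- A's loop, started with accumulated runs `acc`, current bit cb and length cl, followed by
-- the trailing flush, equals: acc, then the run of cb extended by the leading cb's of rest,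
-- then the grouping of the remainder.
theorem pv_fold_runs (rest : List Int) : ∀ (acc : List (List (String × Int))) (cb cl : Int),
    (let st := rest.foldl
        (fun (s : List (List (String × Int)) × Int × Int) bit =>
          if bit == s.2.1 then (s.1, s.2.1, s.2.2 + 1)
          else (s.1 ++ [[("bit", s.2.1), ("length", s.2.2)]], bit, 1))
        (acc, cb, cl)
     st.1 ++ [[("bit", st.2.1), ("length", st.2.2)]])
    = acc ++ ([("bit", cb), ("length", cl + ((rest.takeWhile (fun x => x == cb)).length : Int))]
        :: pvGroupRuns (rest.dropWhile (fun x => x == cb))) := by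
  induction rest with
  | nil => intro acc cb cl; simp [pvGroupRuns]
  | cons b t ih =>
    intro acc cb cl
    by_cases h : b = cb
    · subst h
      simp only [List.foldl_cons, BEq.rfl, if_true, List.takeWhile_cons, List.dropWhile_cons]
      have := ih acc b (cl + 1)
      simp only at this ⊢
      rw [this]
      simp only [List.length_cons]
      push_cast
      ring_nf
    · have hb : (b == cb) = false := by simp [h]
      simp only [List.foldl_cons, hb, Bool.false_eq_true, if_false, List.takeWhile_cons,
        List.dropWhile_cons]
      have := ih (acc ++ [[("bit", cb), ("length", cl)]]) b 1
      simp only at this ⊢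
      rw [this, pvGroupRuns]
      simp only [List.append_assoc, List.cons_append, List.nil_append, List.length_nil]
      push_cast
      ring_nf

-- Nat-index versions of B's two passes (proof-side; the port's Int arithmetic reduces to these).
def pvInner (xs : List Int) : List Nat :=
  (List.range (xs.length - 1)).filter (fun j => !(xs.getD (j + 1) 0 == xs.getD j 0))
def pvBounds (xs : List Int) : List Nat :=
  0 :: ((pvInner xs).map (· + 1) ++ [xs.length])
def pvEmit (xs : List Int) : List (List (String × Int)) :=
  ((pvBounds xs).zip (pvBounds xs).tail).map
    (fun se => [("bit", xs.getD se.1 0), ("length", (se.2 : Int) - (se.1 : Int))])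

-- B's mapped pipeline with Int indices equals the Nat-index pipeline.
theorem pv_zip_cast (xs : List Int) (l : List Nat) :
    ((l.map (fun k : Nat => (k : Int))).zip ((l.map (fun k : Nat => (k : Int))).tail)).map
      (fun se => [("bit", PySem.List.pyGetD xs se.1 0), ("length", se.2 - se.1)])
    = (l.zip l.tail).map
      (fun se => [("bit", xs.getD se.1 0), ("length", (se.2 : Int) - (se.1 : Int))]) := by
  rw [← List.map_tail, List.zip_map, List.map_map]
  apply List.map_congr_left
  intro se _
  rcases se with ⟨s, e⟩
  simp [Prod.map]

theorem pv_filter_shift (xs : List Int) (m : Nat) :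
    ((List.range m).map (fun k : Nat => (1 : Int) + (k : Int))).filter
      (fun i => !(PySem.List.pyGetD xs i 0 == PySem.List.pyGetD xs (i - 1) 0))
    = ((List.range m).filter (fun j => !(xs.getD (j + 1) 0 == xs.getD j 0))).map
        (fun k : Nat => (1 : Int) + (k : Int)) := by
  rw [List.filter_map]
  congr 1
  apply List.filter_congr
  intro j _
  have h1 : (1 : Int) + (j : Int) = ((j + 1 : Nat) : Int) := by push_cast; ring
  simp only [Function.comp, h1, PySem.List.pyGetD_natCast]
  have h2 : ((j + 1 : Nat) : Int) - 1 = ((j : Nat) : Int) := by push_cast; ring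
  rw [h2, PySem.List.pyGetD_natCast]

-- B's body (after the guard, nonempty case) computes pvEmit.
theorem pv_alt_eq_emit (b0 : Int) (rest : List Int) :
    (let sample := b0 :: rest
     let n : Int := PySem.List.len sample
     let bounds : List Int :=
        0 :: ((PySem.List.pyRange 1 n 1).filter
          (fun i => !(PySem.List.pyGetD sample i 0 == PySem.List.pyGetD sample (i - 1) 0))
          ++ [n])
     (bounds.zip bounds.tail).map
        (fun se => [("bit", PySem.List.pyGetD sample se.1 0), ("length", se.2 - se.1)]))
    = pvEmit (b0 :: rest) := by
  dsimp only
  rw [PySem.List.pyRange_one]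
  have hn : (PySem.List.len (b0 :: rest) - 1).toNat = rest.length := by
    simp [PySem.List.len_eq]
  rw [hn, pv_filter_shift]
  have hb : (0 : Int) :: (((List.range rest.length).filter
        (fun j => !((b0 :: rest).getD (j + 1) 0 == (b0 :: rest).getD j 0))).map
        (fun k : Nat => (1 : Int) + (k : Int)) ++ [PySem.List.len (b0 :: rest)])
      = (pvBounds (b0 :: rest)).map (fun k : Nat => (k : Int)) := by
    unfold pvBounds pvInner
    simp only [List.map_cons, List.map_append, List.map_map, Nat.cast_zero,
      List.length_cons, Nat.add_sub_cancel]
    congr 1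
    congr 1
    apply List.map_congr_left
    intro j _
    simp only [Function.comp]
    push_cast
    ring
  rw [hb, pv_zip_cast]
  rfl

-- One step of pvInner: the head boundary (if any) plus the shifted boundaries of the tail.
theorem pv_inner_cons_cons (x y : Int) (l : List Int) :
    pvInner (x :: y :: l)
      = (if (y == x) then ([] : List Nat) else [0]) ++ (pvInner (y :: l)).map (· + 1) := by
  unfold pvInner
  simp only [List.length_cons, Nat.add_sub_cancel]
  rw [List.range_succ_eq_map, List.filter_cons, List.filter_map]
  have hcomp : ∀ j ∈ List.range l.length,
      ((fun j => !((x :: y :: l).getD (j + 1) 0 == (x :: y :: l).getD j 0)) ∘ Nat.succ) j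
      = (fun j => !((y :: l).getD (j + 1) 0 == (y :: l).getD j 0)) j := by
    intro j _
    simp [Function.comp]
  rw [List.filter_congr hcomp]
  by_cases h : (y == x) = true
  · simp [h]
  · have h' : (y == x) = false := by simpa using h
    simp [h']

-- A constant list contributes no boundaries.
theorem pv_inner_const (b : Int) : ∀ (t : List Int), (∀ x ∈ t, x = b) → pvInner (b :: t) = [] := by
  intro t
  induction t with
  | nil => intro _; rfl
  | cons a t ih =>
    intro ht
    have ha : a = b := ht a (by simp)
    subst ha
    rw [pv_inner_cons_cons]
    simp [ih (fun x hx => ht x (by simp [hx]))]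

-- Run-decomposition of pvInner: a maximal b-run, then a different bit c, then the rest.
theorem pv_inner_run (b c : Int) (d' : List Int) (hc : (c == b) = false) :
    ∀ (t : List Int), (∀ x ∈ t, x = b) →
    pvInner ((b :: t) ++ (c :: d'))
      = t.length :: (pvInner (c :: d')).map (· + (t.length + 1)) := by
  intro t
  induction t with
  | nil =>
    intro _
    simp only [List.nil_append, List.cons_append, List.length_nil]
    rw [pv_inner_cons_cons]
    simp only [hc, Bool.false_eq_true, if_false, List.cons_append, List.nil_append]
  | cons a t ih =>
    intro ht
    have ha : a = b := ht a (by simp)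
    subst ha
    have hstep := ih (fun x hx => ht x (by simp [hx]))
    simp only [List.cons_append] at hstep ⊢
    rw [pv_inner_cons_cons, hstep]
    simp only [BEq.rfl, if_true, List.nil_append, List.map_cons, List.map_map,
      List.length_cons]
    congr 1

-- getD across an append, shifted by the prefix length.
theorem pv_getD_shift (u d : List Int) (j : Nat) :
    (u ++ d).getD (u.length + j) 0 = d.getD j 0 := by
  rw [List.getD_append_right u d 0 (u.length + j) (Nat.le_add_right _ _)]
  simp

-- Shifted boundary tables emit the same runs (read through the shifted list).
theorem pv_zip_shift (xs d : List Int) (k : Nat)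
    (hshift : ∀ j : Nat, xs.getD (j + k) 0 = d.getD j 0) :
    ∀ (bl : List Nat),
    ((bl.map (· + k)).zip ((bl.map (· + k)).tail)).map
      (fun se => [("bit", xs.getD se.1 0), ("length", (se.2 : Int) - (se.1 : Int))])
    = (bl.zip bl.tail).map
      (fun se => [("bit", d.getD se.1 0), ("length", (se.2 : Int) - (se.1 : Int))]) := by
  intro bl
  induction bl with
  | nil => rfl
  | cons a bl ih =>
    cases bl with
    | nil => rfl
    | cons a2 bl2 =>
      simp only [List.map_cons, List.tail_cons, List.zip_cons_cons, List.map_cons] at ih ⊢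
      have hlen : ((a2 + k : Nat) : Int) - ((a + k : Nat) : Int) = (a2 : Int) - (a : Int) := by
        push_cast; ring
      rw [hshift a, hlen, ih]

-- A constant b-run emits exactly one run entry.
theorem pv_emit_const (b : Int) (t : List Int) (ht : ∀ x ∈ t, x = b) :
    pvEmit (b :: t) = [[("bit", b), ("length", (t.length : Int) + 1)]] := by
  unfold pvEmit pvBounds
  rw [pv_inner_const b t ht]
  simp

-- Boundary table of run-then-rest: 0 followed by the rest's table shifted by the run length.
theorem pv_bounds_step (b c : Int) (t d' : List Int) (ht : ∀ x ∈ t, x = b)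
    (hc : (c == b) = false) :
    pvBounds ((b :: t) ++ (c :: d'))
      = 0 :: (pvBounds (c :: d')).map (· + (t.length + 1)) := by
  unfold pvBounds
  rw [pv_inner_run b c d' hc t ht]
  simp only [List.map_cons, List.map_append, List.map_map, List.cons_append]
  congr 1
  congr 1
  · omega
  congr 1
  · apply List.map_congr_left
    intro j _
    simp only [Function.comp]
    omega
  · simp only [List.length_append, List.length_cons]
    congr 1
    omega

-- Emission over run-then-rest: the run entry, then the rest's emission.
theorem pv_emit_step (b c : Int) (t d' : List Int) (ht : ∀ x ∈ t, x = b)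
    (hc : (c == b) = false) :
    pvEmit ((b :: t) ++ (c :: d'))
      = [("bit", b), ("length", (t.length : Int) + 1)] :: pvEmit (c :: d') := by
  have hshift : ∀ j : Nat,
      ((b :: t) ++ (c :: d')).getD (j + (t.length + 1)) 0 = (c :: d').getD j 0 := by
    intro j
    have hidx : j + (t.length + 1) = (b :: t).length + j := by
      simp only [List.length_cons]; omega
    rw [hidx, pv_getD_shift]
  have hz := pv_zip_shift ((b :: t) ++ (c :: d')) (c :: d') (t.length + 1) hshift
      (0 :: ((pvInner (c :: d')).map (· + 1) ++ [(c :: d').length]))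
  unfold pvEmit
  rw [pv_bounds_step b c t d' ht hc,
    show pvBounds (c :: d')
      = 0 :: ((pvInner (c :: d')).map (· + 1) ++ [(c :: d').length]) from rfl]
  simp only [List.map_cons, List.tail_cons, List.zip_cons_cons, List.map_cons,
    Nat.zero_add] at hz ⊢
  rw [hz]
  congr 1

-- dropWhile's head fails the predicate.
theorem pv_dropWhile_head (p : Int → Bool) :
    ∀ (l : List Int) (c : Int) (d' : List Int), l.dropWhile p = c :: d' → p c = false := by
  intro l
  induction l with
  | nil => intro c d' h; simp [List.dropWhile] at h
  | cons a l ih =>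
    intro c d' h
    rw [List.dropWhile_cons] at h
    by_cases hp : p a = true
    · rw [if_pos hp] at h
      exact ih c d' h
    · rw [if_neg hp] at h
      obtain ⟨h1, _⟩ := List.cons.inj h
      subst h1
      simpa using hp

-- B's staged passes compute the run grouping.
theorem pv_emit_eq_group : ∀ (m : Nat) (xs : List Int), xs.length ≤ m → xs ≠ [] →
    pvEmit xs = pvGroupRuns xs := by
  intro m
  induction m with
  | zero =>
    intro xs h hne
    cases xs with
    | nil => exact absurd rfl hne
    | cons a l => simp at h
  | succ m ih =>
    intro xs hlen hne
    match xs with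
    | b :: rest =>
      rw [pvGroupRuns]
      have ht : ∀ x ∈ rest.takeWhile (fun x => x == b), x = b := by
        intro x hx
        have h := List.mem_takeWhile_imp hx
        exact eq_of_beq h
      have hsplit : rest.takeWhile (fun x => x == b) ++ rest.dropWhile (fun x => x == b)
          = rest := List.takeWhile_append_dropWhile
      cases hd : rest.dropWhile (fun x => x == b) with
      | nil =>
        have hrest : rest = rest.takeWhile (fun x => x == b) := by
          conv_lhs => rw [← hsplit]
          rw [hd, List.append_nil]
        conv_lhs => rw [hrest]
        rw [pv_emit_const b _ ht]
        simp [pvGroupRuns]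
      | cons c d' =>
        have hc : (c == b) = false := pv_dropWhile_head _ rest c d' hd
        have hrest : rest = rest.takeWhile (fun x => x == b) ++ c :: d' := by
          conv_lhs => rw [← hsplit]
          rw [hd]
        conv_lhs => rw [hrest]
        rw [← List.cons_append, pv_emit_step b c _ d' ht hc]
        congr 1
        apply ih
        · have h1 : rest.length ≤ m := by
            simpa using Nat.lt_succ_iff.mp (Nat.lt_of_lt_of_le (by simp) hlen)
          have h2 : (c :: d').length ≤ rest.length := by
            rw [← hd]; exact List.length_dropWhile_le _ rest
          omega
        · simp

-- ===== VERDICT (by name: the statement is the Claim_ definition above) =====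
theorem extract_runs_spec : Claim_equal_extract_runs := by
  intro bits _ hpre
  unfold Spec_extract_runs extract_runs extract_runs_alt
  have hgf : (bits.any (fun b => !(b == 0 || b == 1))) = false := by
    simp only [List.any_eq_false, Bool.not_eq_eq_eq_not, Bool.not_true]
    intro b hb
    rcases hpre b hb with h | h <;> simp [h]
  simp only [hgf, Bool.false_eq_true, if_false]
  cases bits with
  | nil => rfl
  | cons b0 rest =>
    dsimp only
    have hA := pv_fold_runs rest [] b0 1
    simp only [List.nil_append] at hA
    rw [hA]
    have hB := pv_alt_eq_emit b0 rest
    simp only at hB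
    rw [hB, pv_emit_eq_group (b0 :: rest).length (b0 :: rest) le_rfl (by simp),
      pvGroupRuns]
    ring_nf
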